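-- pv_equiv track=rewrite | github.com/Timsbim/AoC | 2023/day_11.py | offsetting
-- ===== SOURCE A (Python) =====
-- def offsetting(limit, members, base_offset):
--     new_members, offset = {}, 0
--     for n in range(limit):
--         if n in members:
--             new_members[n] = n + offset
--         else:
--             offset += base_offset
--     return new_members
-- ===== SOURCE B (Python) =====
-- def offsetting(limit, members, base_offset):
--     ms = sorted({m for m in members if 0 <= m < limit})
--     return {m: m + base_offset * (m - r) for r, m in enumerate(ms)}
-- ===== Notes on version B (the rewrite author's own statement) =====
-- stated objective: alternative
-- what changed: Instead of scanning every n in range(limit) with a membership test and a running offset accumulator, B sorts the members lying in [0, limit) and computes each one's offset in closed form as base_offset*(m - rank); the range(limit) loop and the accumulator disappear.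
import Mathlib
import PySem

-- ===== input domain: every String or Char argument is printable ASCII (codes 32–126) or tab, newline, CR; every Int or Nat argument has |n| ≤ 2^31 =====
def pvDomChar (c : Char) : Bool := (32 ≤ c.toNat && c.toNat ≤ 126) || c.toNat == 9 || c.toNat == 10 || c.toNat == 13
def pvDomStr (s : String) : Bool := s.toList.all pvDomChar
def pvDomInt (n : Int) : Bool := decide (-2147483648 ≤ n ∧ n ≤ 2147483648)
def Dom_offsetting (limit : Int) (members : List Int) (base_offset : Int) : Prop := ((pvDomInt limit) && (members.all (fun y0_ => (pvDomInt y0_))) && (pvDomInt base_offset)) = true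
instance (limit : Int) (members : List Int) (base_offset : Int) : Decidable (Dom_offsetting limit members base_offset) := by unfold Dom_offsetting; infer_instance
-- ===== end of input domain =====

-- B replaces A's scan of all of range(limit) by sorting the members below the limit and
-- computing each member's offset in closed form from its rank (objective: alternative).

-- ===== PORT A =====
def offsetting (limit : Int) (members : List Int) (base_offset : Int) : List (Int × Int) :=
  ((PySem.List.pyRange 0 limit 1).foldl
    (fun (st : PySem.Dict Int Int × Int) n =>
      if n ∈ members then (st.1.insert n (n + st.2), st.2)
      else (st.1, st.2 + base_offset))
    (PySem.Dict.mk [], 0)).1.items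

-- ===== PORT B =====
def offsetting_alt (limit : Int) (members : List Int) (base_offset : Int) : List (Int × Int) :=
  (PySem.List.enumerate
      (PySem.List.sorted
        (PySem.Set.ofList (members.filter (fun m => decide (0 ≤ m ∧ m < limit))))
        (fun x => x)) 0).map
    (fun p => (p.2, p.2 + base_offset * (p.2 - p.1)))

-- ===== PRECONDITION & SPEC =====
def Spec_offsetting (limit : Int) (members : List Int) (base_offset : Int) (out : List (Int × Int)) : Prop := out = offsetting_alt limit members base_offset
instance (limit : Int) (members : List Int) (base_offset : Int) (out : List (Int × Int)) : Decidable (Spec_offsetting limit members base_offset out) := by unfold Spec_offsetting; infer_instance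

-- ===== CLAIM (what is proved, stated in full; the proofs are below) =====
def Claim_equal_offsetting : Prop := ∀ (limit : Int) (members : List Int) (base_offset : Int), Dom_offsetting limit members base_offset → Spec_offsetting limit members base_offset (offsetting limit members base_offset)

-- ===== LEMMAS AND PROOFS =====

-- the sorted list of distinct members below `limit` (the list B enumerates)
def pvL (limit : Int) (members : List Int) : List Int :=
  PySem.List.sorted
    (PySem.Set.ofList (members.filter (fun m => decide (0 ≤ m ∧ m < limit))))
    (fun x => x)

lemma pvL_mem (limit : Int) (members : List Int) (x : Int) :
    x ∈ pvL limit members ↔ x ∈ members ∧ 0 ≤ x ∧ x < limit := by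
  unfold pvL
  rw [(PySem.List.sorted_perm _ _ _).mem_iff, PySem.Set.mem_ofList, List.mem_filter]
  simp

lemma pvL_nodup (limit : Int) (members : List Int) : (pvL limit members).Nodup :=
  (PySem.List.sorted_perm _ _ _).nodup_iff.mpr (PySem.Set.nodup_ofList _)

lemma pvL_pairwise_lt (limit : Int) (members : List Int) :
    (pvL limit members).Pairwise (· < ·) := by
  have h1 := PySem.List.sorted_pairwise
    (PySem.Set.ofList (members.filter (fun m => decide (0 ≤ m ∧ m < limit)))) (fun x => x)
  have h2 : (pvL limit members).Pairwise (· ≠ ·) := pvL_nodup limit members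
  exact (h1.and h2).imp (fun h => lt_of_le_of_ne h.1 h.2)

lemma pvL_zero_of_nonpos (limit : Int) (members : List Int) (h : limit ≤ 0) :
    pvL limit members = [] := by
  unfold pvL
  have : members.filter (fun m => decide (0 ≤ m ∧ m < limit)) = [] := by
    rw [List.filter_eq_nil_iff]; intro x _; simp; omega
  rw [this]
  exact PySem.List.sorted_eq_of_perm_of_pairwise_lt _ _ _ (by rfl) List.Pairwise.nil

lemma pvL_succ (k : Nat) (members : List Int) :
    pvL ((k : Int) + 1) members =
      if (k : Int) ∈ members then pvL (k : Int) members ++ [(k : Int)] else pvL (k : Int) members := by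
  split
  case isTrue hmem =>
    apply PySem.List.sorted_eq_of_perm_of_pairwise_lt
    · have hk : (k : Int) ∉ pvL (k : Int) members := by
        rw [pvL_mem]; omega
      rw [List.perm_ext_iff_of_nodup
        (by
          rw [List.nodup_append]
          refine ⟨pvL_nodup _ _, List.nodup_singleton _, ?_⟩
          intro a ha b hb
          rw [List.mem_singleton] at hb
          subst hb
          exact fun h => hk (h ▸ ha))
        (PySem.Set.nodup_ofList _)]
      intro a
      rw [PySem.Set.mem_ofList, List.mem_filter, List.mem_append, pvL_mem]
      constructor
      · rintro (⟨h1, h2, h3⟩ | h)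
        · exact ⟨h1, by simp only [decide_eq_true_eq]; omega⟩
        · simp at h; subst h; exact ⟨hmem, by simp only [decide_eq_true_eq]; omega⟩
      · rintro ⟨h1, h2⟩
        simp at h2
        by_cases hak : a = (k : Int)
        · right; simp [hak]
        · left; exact ⟨h1, h2.1, by omega⟩
    · rw [List.pairwise_append]
      refine ⟨pvL_pairwise_lt _ _, List.pairwise_singleton _ _, ?_⟩
      intro a ha b hb
      simp at hb; subst hb
      exact ((pvL_mem _ _ _).mp ha).2.2
  case isFalse hmem =>
    unfold pvL
    have hf : members.filter (fun m => decide (0 ≤ m ∧ m < (k : Int) + 1))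
        = members.filter (fun m => decide (0 ≤ m ∧ m < (k : Int))) := by
      apply List.filter_congr
      intro x hx
      have hxk : x ≠ (k : Int) := fun h => hmem (h ▸ hx)
      simp only [decide_eq_decide]
      omega
    rw [hf]

lemma offsetting_loop (members : List Int) (base_offset : Int) (k : Nat) :
    (PySem.List.pyRange 0 (k : Int) 1).foldl
      (fun (st : PySem.Dict Int Int × Int) n =>
        if n ∈ members then (st.1.insert n (n + st.2), st.2)
        else (st.1, st.2 + base_offset))
      (PySem.Dict.mk [], 0)
    = (PySem.Dict.mk ((PySem.List.enumerate (pvL (k : Int) members) 0).map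
          (fun p => (p.2, p.2 + base_offset * (p.2 - p.1)))),
       base_offset * ((k : Int) - (pvL (k : Int) members).length)) := by
  induction k with
  | zero =>
      simp only [Nat.cast_zero]
      rw [PySem.List.pyRange_one_eq_nil (by omega), pvL_zero_of_nonpos 0 members (by omega)]
      simp [PySem.List.enumerate]
  | succ k ih =>
      have hcast : ((k + 1 : Nat) : Int) = (k : Int) + 1 := by push_cast; ring
      rw [hcast, PySem.List.pyRange_one_succ_right (by omega), List.foldl_append, ih,
        pvL_succ k members]
      simp only [List.foldl_cons, List.foldl_nil]
      by_cases hmem : (k : Int) ∈ members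
      · simp only [hmem, ite_true]
        have hnc : (PySem.Dict.mk ((PySem.List.enumerate (pvL (k : Int) members) 0).map
            (fun p => (p.2, p.2 + base_offset * (p.2 - p.1))))).contains (k : Int) = false := by
          rw [PySem.Dict.contains_mk]
          rw [List.any_eq_false]
          rintro ⟨a, b⟩ hab
          simp only [List.mem_map] at hab
          obtain ⟨p, hp, hpe⟩ := hab
          have : p.2 ∈ pvL (k : Int) members := by
            have := PySem.List.map_snd_enumerate (pvL (k : Int) members) 0
            exact this ▸ List.mem_map_of_mem hp
          have hlt := ((pvL_mem _ _ _).mp this).2.2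
          have ha : a = p.2 := by cases hpe; rfl
          simp [ha]
          omega
        refine Prod.ext ?_ ?_
        · apply PySem.Dict.ext
          rw [PySem.Dict.items_insert_of_not_contains _ _ hnc]
          rw [PySem.List.enumerate_append, List.map_append]
          congr 1
          simp only [PySem.List.enumerate, List.map_cons, List.map_nil]
          have : (0 : Int) + (pvL (k : Int) members).length = (pvL (k : Int) members).length := by ring
          rw [this]
        · simp only []
          have hlen : ((pvL (k : Int) members ++ [(k : Int)]).length : Int)
              = ((pvL (k : Int) members).length : Int) + 1 := by
            simp
          rw [hlen]; ring
      · simp only [hmem, ite_false]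
        refine Prod.ext rfl ?_
        simp only []
        ring

-- ===== VERDICT (by name: the statement is the Claim_ definition above) =====
theorem offsetting_spec : Claim_equal_offsetting := by
  intro limit members base_offset _
  unfold Spec_offsetting offsetting offsetting_alt
  by_cases hpos : 0 < limit
  · have hk : limit = ((limit.toNat : Nat) : Int) := by omega
    rw [hk, offsetting_loop]
    rfl
  · rw [PySem.List.pyRange_one_eq_nil (by omega)]
    have h0 : pvL limit members = [] := pvL_zero_of_nonpos limit members (by omega)
    unfold pvL at h0
    rw [h0]
    simp [PySem.List.enumerate]
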